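-- pv_equiv track=rewrite | github.com/wielgos/WDI | zestaw4/cw20.py | najwieksze_szachowane_pole
-- ===== SOURCE A (Python) =====
-- def suma_kolumny(t,k):
--     N = len(t)
--     s = 0
--     for i in range(N):
--         s += t[i][k]
--     return s
--
-- def suma_wiersza(t,w):
--     N = len(t)
--     s = 0
--     for i in range(N):
--         s += t[w][i]
--     return s
--
-- def najwieksze_szachowane_pole(t):
--     N = len(t)
--     max_value = 0
--     max_i, max_j = -1, -1
--     max_i2, max_j2 = -1, -1
--     for i in range(N):
--         for j in range(N): #[i][j] to pozycja 1 wiezy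
--             for i2 in range(i,N):
--                 for j2 in range(j+1,N): #[i2][j2] to pozycja 2 wiezy
--                     value = suma_kolumny(t,j) + suma_wiersza(t,i) + suma_kolumny(t,j2) + suma_wiersza(t,i2)
--                     if i2 == i: #jezeli stoja w obrebie tego samego wiersza
--                         value = value - suma_wiersza(t,i2)
--                         value = value - 2*(t[i][j] + t[i2][j2])
--                     elif j2 == j: #jezeli stoja w obrebie tej samej kolumny
--                         value = value - suma_kolumny(t,j2)
--                         value = value - 2*(t[i][j] + t[i2][j2])
--                     else:
--                         value = value - t[i][j2] - t[i2][j] - 2*(t[i][j] + t[i2][j2])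
--                     if value > max_value:
--                         max_value = value
--                         max_i, max_j = i, j
--                         max_i2, max_j2 = i2, j2
--     return max_i,max_j,max_i2,max_j2,max_value
-- ===== SOURCE B (Python) =====
-- def najwieksze_szachowane_pole(t):
--     N = len(t)
--     rows = [sum(r[:N]) for r in t]
--     cols = [sum(row[j] for row in t) for j in range(N)]
--
--     def attacked(i, j, i2, j2):
--         if i2 == i:
--             return rows[i] + cols[j] + cols[j2] - 2 * (t[i][j] + t[i][j2])
--         return (rows[i] + rows[i2] + cols[j] + cols[j2]
--                 - t[i][j2] - t[i2][j] - 2 * (t[i][j] + t[i2][j2]))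
--
--     cands = [(-1, -1, -1, -1, 0)] + [
--         (i, j, i2, j2, attacked(i, j, i2, j2))
--         for i in range(N) for j in range(N)
--         for i2 in range(i, N) for j2 in range(j + 1, N)]
--     return max(cands, key=lambda c: c[4])
-- ===== Notes on version B (the rewrite author's own statement) =====
-- stated objective: faster
-- what changed: B precomputes all row and column sums once, builds the list of candidate placements with O(1) work each and picks the best with a single max(key=...) pass, instead of A's four nested loops that rescan a full row/column (O(N)) for every pair of squares.
-- outside the precondition, e.g. on najwieksze_szachowane_pole([[]]): A returns (-1, -1, -1, -1, 0), B raises IndexError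
import Mathlib
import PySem

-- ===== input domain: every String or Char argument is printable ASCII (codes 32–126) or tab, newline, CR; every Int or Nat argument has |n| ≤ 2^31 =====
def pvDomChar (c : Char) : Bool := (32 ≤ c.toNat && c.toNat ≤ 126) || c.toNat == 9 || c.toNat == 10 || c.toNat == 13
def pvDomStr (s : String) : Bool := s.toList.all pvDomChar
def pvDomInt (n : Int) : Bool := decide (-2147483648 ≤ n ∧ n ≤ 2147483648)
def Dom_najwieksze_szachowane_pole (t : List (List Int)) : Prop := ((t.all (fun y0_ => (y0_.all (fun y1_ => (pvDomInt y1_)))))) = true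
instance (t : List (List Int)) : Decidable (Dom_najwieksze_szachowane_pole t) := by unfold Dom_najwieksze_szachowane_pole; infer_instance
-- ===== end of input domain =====

-- B precomputes all row/column sums once and picks the best candidate with one max pass (O(N^4) vs A's O(N^5)).

-- ===== PORT A =====
-- shared packaging of the returned 5-tuple (max_i, max_j, max_i2, max_j2, max_value) as a List Int
def pvOut (r : Int × Int × Int × Int × Int) : List Int :=
  [r.1, r.2.1, r.2.2.1, r.2.2.2.1, r.2.2.2.2]

def suma_kolumny (t : List (List Int)) (k : Int) : Int :=
  (PySem.List.pyRange 0 (t.length : Int) 1).foldl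
    (fun s i => s + PySem.List.pyGetD (PySem.List.pyGetD t i []) k 0) 0

def suma_wiersza (t : List (List Int)) (w : Int) : Int :=
  (PySem.List.pyRange 0 (t.length : Int) 1).foldl
    (fun s i => s + PySem.List.pyGetD (PySem.List.pyGetD t w []) i 0) 0

def najwieksze_szachowane_pole (t : List (List Int)) : List Int :=
  let N : Int := t.length
  let r := (PySem.List.pyRange 0 N 1).foldl (fun s i =>
    (PySem.List.pyRange 0 N 1).foldl (fun s j =>
      (PySem.List.pyRange i N 1).foldl (fun s i2 =>
        (PySem.List.pyRange (j+1) N 1).foldl (fun s j2 =>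
          let value := suma_kolumny t j + suma_wiersza t i + suma_kolumny t j2 + suma_wiersza t i2
          let value :=
            if i2 == i then
              value - suma_wiersza t i2
                - 2 * (PySem.List.pyGetD (PySem.List.pyGetD t i []) j 0
                     + PySem.List.pyGetD (PySem.List.pyGetD t i2 []) j2 0)
            else if j2 == j then
              value - suma_kolumny t j2
                - 2 * (PySem.List.pyGetD (PySem.List.pyGetD t i []) j 0
                     + PySem.List.pyGetD (PySem.List.pyGetD t i2 []) j2 0)
            else
              value - PySem.List.pyGetD (PySem.List.pyGetD t i []) j2 0
                - PySem.List.pyGetD (PySem.List.pyGetD t i2 []) j 0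
                - 2 * (PySem.List.pyGetD (PySem.List.pyGetD t i []) j 0
                     + PySem.List.pyGetD (PySem.List.pyGetD t i2 []) j2 0)
          if value > s.2.2.2.2 then (i, j, i2, j2, value) else s) s) s) s)
    ((-1, -1, -1, -1, 0) : Int × Int × Int × Int × Int)
  pvOut r

-- ===== PORT B =====
def rowsB (t : List (List Int)) : List Int :=
  t.map (fun r => (PySem.List.slice r none (some (t.length : Int))).sum)

def colsB (t : List (List Int)) : List Int :=
  (PySem.List.pyRange 0 (t.length : Int) 1).map
    (fun j => (t.map (fun row => PySem.List.pyGetD row j 0)).sum)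

def attackedB (t : List (List Int)) (i j i2 j2 : Int) : Int :=
  if i2 == i then
    PySem.List.pyGetD (rowsB t) i 0 + PySem.List.pyGetD (colsB t) j 0
      + PySem.List.pyGetD (colsB t) j2 0
      - 2 * (PySem.List.pyGetD (PySem.List.pyGetD t i []) j 0
           + PySem.List.pyGetD (PySem.List.pyGetD t i []) j2 0)
  else
    PySem.List.pyGetD (rowsB t) i 0 + PySem.List.pyGetD (rowsB t) i2 0
      + PySem.List.pyGetD (colsB t) j 0 + PySem.List.pyGetD (colsB t) j2 0
      - PySem.List.pyGetD (PySem.List.pyGetD t i []) j2 0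
      - PySem.List.pyGetD (PySem.List.pyGetD t i2 []) j 0
      - 2 * (PySem.List.pyGetD (PySem.List.pyGetD t i []) j 0
           + PySem.List.pyGetD (PySem.List.pyGetD t i2 []) j2 0)

def candsB (t : List (List Int)) : List (Int × Int × Int × Int × Int) :=
  (-1, -1, -1, -1, 0) ::
    (PySem.List.pyRange 0 (t.length : Int) 1).flatMap (fun i =>
      (PySem.List.pyRange 0 (t.length : Int) 1).flatMap (fun j =>
        (PySem.List.pyRange i (t.length : Int) 1).flatMap (fun i2 =>
          (PySem.List.pyRange (j+1) (t.length : Int) 1).map (fun j2 =>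
            (i, j, i2, j2, attackedB t i j i2 j2)))))

-- candsB is never empty (it starts with the sentinel), so max? always returns some;
-- the .getD default only totalizes the unreachable none case of Python's max.
def najwieksze_szachowane_pole_alt (t : List (List Int)) : List Int :=
  pvOut ((PySem.List.max? (candsB t) (fun c => c.2.2.2.2)).getD (-1, -1, -1, -1, 0))

-- ===== PRECONDITION & SPEC =====
-- Pre_ keeps boards whose rows all have at least N = len(t) entries: on shorter rows A raises
-- IndexError for N ≥ 2, and on the one remaining shape (N = 1 with an empty row, e.g. [[]])
-- A returns the default while B itself raises IndexError building the column sums.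
def Pre_najwieksze_szachowane_pole (t : List (List Int)) : Prop :=
  ∀ r ∈ t, t.length ≤ r.length
instance (t : List (List Int)) : Decidable (Pre_najwieksze_szachowane_pole t) := by
  unfold Pre_najwieksze_szachowane_pole; infer_instance

def pvWitness_najwieksze_szachowane_pole : List (List Int) := [[1, 2], [3, 4]]

def Spec_najwieksze_szachowane_pole (t : List (List Int)) (out : List Int) : Prop := out = najwieksze_szachowane_pole_alt t
instance (t : List (List Int)) (out : List Int) : Decidable (Spec_najwieksze_szachowane_pole t out) := by unfold Spec_najwieksze_szachowane_pole; infer_instance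

-- ===== CLAIM (what is proved, stated in full; the proofs are below) =====
def Claim_equal_najwieksze_szachowane_pole : Prop := ∀ (t : List (List Int)), Dom_najwieksze_szachowane_pole t → Pre_najwieksze_szachowane_pole t → Spec_najwieksze_szachowane_pole t (najwieksze_szachowane_pole t)

-- ===== LEMMAS AND PROOFS =====

-- Python max(c0 :: cs, key) is the running strict-improvement fold started at c0.
theorem pv_max?_cons_eq_foldl {α κ : Type} [LT κ] [DecidableLT κ] (key : α → κ) (c0 : α)
    (cs : List α) :
    PySem.List.max? (c0 :: cs) key
      = some (cs.foldl (fun m x => if key m < key x then x else m) c0) := by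
  have aux : ∀ (cs : List α) (a : α),
      cs.foldl (fun acc x =>
        match acc with
        | none => some x
        | some m => if key m < key x then some x else some m) (some a)
        = some (cs.foldl (fun m x => if key m < key x then x else m) a) := by
    intro cs
    induction cs with
    | nil => intro a; rfl
    | cons x xs ih =>
        intro a
        simp only [List.foldl_cons]
        rw [show (if key a < key x then some x else some a)
              = some (if key a < key x then x else a) from (apply_ite some _ _ _).symm]
        exact ih _
  simp only [PySem.List.max?, List.foldl_cons]
  exact aux cs c0

theorem pv_step_congr (s : Int × Int × Int × Int × Int) (i j i2 j2 x y : Int) (h : x = y) :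
    (if s.2.2.2.2 < x then (i, j, i2, j2, x) else s)
      = (if s.2.2.2.2 < y then (i, j, i2, j2, y) else s) := by
  rw [h]

theorem pv_cols_eq (t : List (List Int)) (j : Int) (h0 : 0 ≤ j) (h1 : j < (t.length : Int)) :
    suma_kolumny t j = PySem.List.pyGetD (colsB t) j 0 := by
  unfold colsB
  rw [PySem.List.pyGetD_map_pyRange_of_nonneg _ _ _ _ h0 h1]
  unfold suma_kolumny
  rw [PySem.List.foldl_pyRange_zero_pyGetD' t [] (fun s row => s + PySem.List.pyGetD row j 0) 0]
  rw [List.sum_eq_foldl, List.foldl_map]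

theorem pv_rows_eq (t : List (List Int)) (hpre : Pre_najwieksze_szachowane_pole t)
    (w : Int) (h0 : 0 ≤ w) (h1 : w < (t.length : Int)) :
    suma_wiersza t w = PySem.List.pyGetD (rowsB t) w 0 := by
  have hfnil : ((PySem.List.slice ([] : List Int) none (some (t.length : Int))).sum) = 0 := by
    rw [PySem.List.slice_to_natCast]
    simp
  have hr : PySem.List.pyGetD t w [] = t[w.toNat] := PySem.List.pyGetD_eq_getElem t [] h0 h1
  have hlen' : t.length ≤ (PySem.List.pyGetD t w []).length := by
    rw [hr]; exact hpre _ (List.getElem_mem _)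
  have htake : ((PySem.List.pyGetD t w []).take t.length).length = t.length := by
    simp [List.length_take]; omega
  have hcong : ∀ (s : Int), ∀ i ∈ PySem.List.pyRange 0 (t.length : Int) 1,
      s + PySem.List.pyGetD (PySem.List.pyGetD t w []) i 0
        = s + PySem.List.pyGetD ((PySem.List.pyGetD t w []).take t.length) i 0 := by
    intro s i hi
    rw [PySem.List.mem_pyRange_one] at hi
    have hi1 : i < ((PySem.List.pyGetD t w []).length : Int) := by omega
    have hi2 : i < (((PySem.List.pyGetD t w []).take t.length).length : Int) := by
      rw [htake]; omega
    rw [PySem.List.pyGetD_eq_getElem _ 0 hi.1 hi1,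
        PySem.List.pyGetD_eq_getElem _ 0 hi.1 hi2]
    rw [List.getElem_take]
  unfold suma_wiersza rowsB
  conv_rhs => rw [← hfnil]
  rw [PySem.List.pyGetD_map (fun r => (PySem.List.slice r none (some (t.length : Int))).sum) t w []]
  rw [PySem.List.slice_to_natCast]
  rw [PySem.List.foldl_congr_mem _ _
        (fun s i => s + PySem.List.pyGetD ((PySem.List.pyGetD t w []).take t.length) i 0) _ hcong]
  rw [show ((t.length : Nat) : Int)
        = ((((PySem.List.pyGetD t w []).take t.length).length : Nat) : Int) from by rw [htake]]
  rw [PySem.List.foldl_pyRange_zero_pyGetD' ((PySem.List.pyGetD t w []).take t.length) 0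
        (fun s x => s + x) 0]
  rw [List.sum_eq_foldl]

-- ===== VERDICT (by name: the statement is the Claim_ definition above) =====
theorem najwieksze_szachowane_pole_spec : Claim_equal_najwieksze_szachowane_pole := by
  intro t _hdom hpre
  show najwieksze_szachowane_pole t = najwieksze_szachowane_pole_alt t
  unfold najwieksze_szachowane_pole najwieksze_szachowane_pole_alt candsB
  rw [pv_max?_cons_eq_foldl]
  simp only [Option.getD_some, List.foldl_flatMap, List.foldl_map, gt_iff_lt]
  apply congrArg
  apply PySem.List.foldl_congr_mem
  intro s0 i hi
  apply PySem.List.foldl_congr_mem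
  intro s1 j hj
  apply PySem.List.foldl_congr_mem
  intro s2 i2 hi2
  apply PySem.List.foldl_congr_mem
  intro s3 j2 hj2
  rw [PySem.List.mem_pyRange_one] at hi hj hi2 hj2
  have hCj := pv_cols_eq t j hj.1 hj.2
  have hCj2 := pv_cols_eq t j2 (by omega) hj2.2
  have hRi := pv_rows_eq t hpre i hi.1 hi.2
  have hRi2 := pv_rows_eq t hpre i2 (by omega) hi2.2
  apply pv_step_congr
  by_cases hii : i2 = i
  · subst hii
    simp only [attackedB, beq_self_eq_true, if_true]
    rw [hCj, hCj2, hRi2]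
    ring
  · have hjj : ¬ (j2 = j) := by omega
    simp only [attackedB, beq_iff_eq, hii, hjj, if_false]
    rw [hCj, hCj2, hRi, hRi2]
    ring
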